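-- pv_equiv track=rewrite | github.com/jinyoung5497/Coding_Test | 프로그래머스/0/181857. 배열의 길이를 2의 거듭제곱으로 만들기/배열의 길이를 2의 거듭제곱으로 만들기.py | solution
-- ===== SOURCE A (Python) =====
-- def solution(arr):
--     answer = [0] * 2
--     while len(arr) > len(answer):
--         answer *= 2
--     for i in range(len(arr)):
--         answer[i] = arr[i]
--     if len(arr) == 1:
--         answer = arr
--     return answer
-- ===== SOURCE B (Python) =====
-- def solution(arr):
--     n = len(arr)
--     if n == 1:
--         return arr
--     target = 2 if n <= 2 else 1 << (n - 1).bit_length()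
--     return arr + [0] * (target - n)
-- ===== Notes on version B (the rewrite author's own statement) =====
-- stated objective: idiomatic
-- what changed: Replaces the doubling while-loop and the element-by-element copy loop with a closed-form bit_length computation of the target power-of-two length and a single list concatenation with zero padding.
import Mathlib
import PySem

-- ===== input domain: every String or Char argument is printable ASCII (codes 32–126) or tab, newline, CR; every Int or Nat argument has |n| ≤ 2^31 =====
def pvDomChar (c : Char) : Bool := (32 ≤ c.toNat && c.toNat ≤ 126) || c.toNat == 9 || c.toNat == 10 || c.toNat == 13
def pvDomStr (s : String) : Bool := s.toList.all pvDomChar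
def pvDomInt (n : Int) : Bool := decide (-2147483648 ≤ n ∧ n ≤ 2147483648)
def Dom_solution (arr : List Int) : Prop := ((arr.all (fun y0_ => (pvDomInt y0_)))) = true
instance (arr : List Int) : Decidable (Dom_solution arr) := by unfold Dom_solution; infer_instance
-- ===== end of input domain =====

-- B replaces A's doubling while-loop and element-copy loop by a closed-form
-- bit_length target length and a single concatenation (idiomatic; same asymptotic cost).

-- ===== PORT A =====
-- 'while len(arr) > len(answer): answer *= 2' — fuel-based recursion; fuel = len(arr)
-- suffices since the length doubles from 2 each iteration (2^(k+1) ≥ n for some k < n).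
def solutionGrow (fuel : Nat) (ans : List Int) (n : Nat) : List Int :=
  match fuel with
  | 0 => ans
  | f + 1 => if ans.length < n then solutionGrow f (ans ++ ans) n else ans

def solution (arr : List Int) : List Int :=
  let answer := solutionGrow arr.length (List.replicate 2 0) arr.length
  -- 'for i in range(len(arr)): answer[i] = arr[i]' — indices are always in range,
  -- so arr.getD i 0 is exactly Python's arr[i] here.
  let answer := (List.range arr.length).foldl (fun ans i => ans.set i (arr.getD i 0)) answer
  if arr.length == 1 then arr else answer

-- ===== PORT B =====
def solution_alt (arr : List Int) : List Int :=
  let n := arr.length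
  if n == 1 then arr
  else
    let target : Nat := if n ≤ 2 then 2 else 2 ^ Nat.size (n - 1)  -- 1 << (n-1).bit_length()
    arr ++ List.replicate (target - n) 0

-- ===== PRECONDITION & SPEC =====
def Spec_solution (arr : List Int) (out : List Int) : Prop := out = solution_alt arr
instance (arr : List Int) (out : List Int) : Decidable (Spec_solution arr out) := by unfold Spec_solution; infer_instance

-- ===== CLAIM (what is proved, stated in full; the proofs are below) =====
def Claim_equal_solution : Prop := ∀ (arr : List Int), Dom_solution arr → Spec_solution arr (solution arr)

-- ===== LEMMAS AND PROOFS =====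

-- Length-level mirror of the doubling loop.
def growLen (fuel L n : Nat) : Nat :=
  match fuel with
  | 0 => L
  | f + 1 => if L < n then growLen f (2 * L) n else L

lemma grow_replicate (f L n : Nat) :
    solutionGrow f (List.replicate L (0 : Int)) n = List.replicate (growLen f L n) 0 := by
  induction f generalizing L with
  | zero => simp [solutionGrow, growLen]
  | succ f ih =>
      simp only [solutionGrow, growLen, List.length_replicate]
      split
      · rw [← List.replicate_add, ← two_mul, ih]
      · rfl

lemma growLen_eq (n : Nat) (hn : 3 ≤ n) :
    ∀ f j, 0 < j → Nat.size (n - 1) ≤ j + f → j ≤ Nat.size (n - 1) →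
      growLen f (2 ^ j) n = 2 ^ Nat.size (n - 1) := by
  intro f
  induction f with
  | zero =>
      intro j _ h1 h2
      have : j = Nat.size (n - 1) := le_antisymm h2 (by omega)
      simp [growLen, this]
  | succ f ih =>
      intro j hj h1 h2
      simp only [growLen]
      split
      · next h =>
          have hle : 2 ^ j ≤ n - 1 := by omega
          have hlt : j < Nat.size (n - 1) := Nat.lt_size.mpr hle
          rw [show 2 * 2 ^ j = 2 ^ (j + 1) by rw [pow_succ]; ring]
          exact ih (j + 1) (by omega) (by omega) (by omega)
      · next h =>
          have hsle : Nat.size (n - 1) ≤ j := Nat.size_le.mpr (by omega)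
          have : j = Nat.size (n - 1) := le_antisymm h2 hsle
          rw [this]

lemma n_le_pow_size (n : Nat) (hn : 3 ≤ n) : n ≤ 2 ^ Nat.size (n - 1) := by
  have := Nat.lt_size_self (n - 1)
  have h : n - 1 < 2 ^ Nat.size (n - 1) := Nat.size_le.mp le_rfl
  omega

lemma one_le_size (n : Nat) (hn : 3 ≤ n) : 1 ≤ Nat.size (n - 1) := by
  have : 0 < Nat.size (n - 1) := Nat.size_pos.mpr (by omega)
  omega

-- Copy loop: writing arr[0..k) into a zero buffer of length L ≥ len(arr).
lemma copy_loop (arr : List Int) (L : Nat) (hL : arr.length ≤ L) :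
    ∀ k, k ≤ arr.length →
      (List.range k).foldl (fun ans i => ans.set i (arr.getD i 0)) (List.replicate L 0)
        = arr.take k ++ List.replicate (L - k) 0 := by
  intro k
  induction k with
  | zero => simp
  | succ k ih =>
      intro hk
      have hk' : k < arr.length := by omega
      have hkL : k < L := by omega
      rw [List.range_succ, List.foldl_append, ih (by omega)]
      simp only [List.foldl_cons, List.foldl_nil]
      have hlen : (arr.take k).length = k := by simp; omega
      have hrep : List.replicate (L - k) (0 : Int) = 0 :: List.replicate (L - k - 1) 0 := by
        rw [← List.replicate_succ]; congr 1; omega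
      rw [hrep, List.set_append_right _ _ (by omega)]
      simp only [hlen, Nat.sub_self, List.set_cons_zero, Nat.sub_sub]
      have ht : List.take (k + 1) arr = List.take k arr ++ [arr[k]] := by
        rw [List.take_add_one, List.getElem?_eq_getElem hk']; simp
      rw [ht, List.append_assoc]
      simp [List.getElem?_eq_getElem hk']

lemma growLen_main (n : Nat) (hn : 2 ≤ n) :
    growLen n 2 n = (if n ≤ 2 then 2 else 2 ^ Nat.size (n - 1)) := by
  by_cases h2 : n ≤ 2
  · have : n = 2 := by omega
    subst this
    simp [growLen]
  · have hn3 : 3 ≤ n := by omega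
    rw [if_neg h2]
    have hfuel : Nat.size (n - 1) ≤ 1 + n := by
      have : n - 1 < 2 ^ n := lt_of_le_of_lt (Nat.sub_le n 1) Nat.lt_two_pow_self
      have := Nat.size_le.mpr this
      omega
    have := growLen_eq n hn3 n 1 (by omega) (by omega) (one_le_size n hn3)
    simpa [pow_one] using this

-- ===== VERDICT (by name: the statement is the Claim_ definition above) =====
theorem solution_spec : Claim_equal_solution := by
  intro arr _
  unfold Spec_solution solution solution_alt
  simp only
  by_cases h1 : arr.length = 1
  · simp [h1]
  · rw [if_neg (by simpa using h1), if_neg (by simpa using h1)]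
    by_cases h0 : arr.length = 0
    · have : arr = [] := List.eq_nil_of_length_eq_zero h0
      subst this
      simp [solutionGrow]
    · have hn2 : 2 ≤ arr.length := by omega
      set n := arr.length with hn
      have hT : n ≤ (if n ≤ 2 then 2 else 2 ^ Nat.size (n - 1)) := by
        by_cases h2 : n ≤ 2
        · simp [h2]
        · rw [if_neg h2]; exact n_le_pow_size n (by omega)
      rw [grow_replicate, growLen_main n hn2,
          copy_loop arr _ hT n le_rfl, List.take_of_length_le (by omega)]
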